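-- pv_equiv track=rewrite | github.com/faisal-rasool/codility-java-practice | src/main/resources/FirstRound/solutions-hammad/7.py | solution
-- ===== SOURCE A (Python) =====
-- def solution(D: list, X: int) -> int:
--
--     nDays = 1               # start from day 1
--     minDifficulty = D[0]    # keep track of minimum difficulty each day
--     maxDifficulty = D[0]    # keep track of maximum difficulty each day
--
--     for i in range(1, len(D)):  # iterating from 2nd level onwards (not days)
--
--         currentDifficulty = D[i]
--
--         # if the difference of current difficulty and min/max is more than X
--         if (X < (currentDifficulty - minDifficulty)) or (X < (maxDifficulty - currentDifficulty)):
--             # then we move to the next day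
--             nDays += 1
--
--             # at the start of each day
--             # min/max difficulty is the difficulty of the first level of that day
--             minDifficulty = currentDifficulty
--             maxDifficulty = currentDifficulty
--
--         else:
--             # we stay in the same day and
--             # we update the min/max difficulties for that day
--             minDifficulty = min(minDifficulty, currentDifficulty)
--             maxDifficulty = max(maxDifficulty, currentDifficulty)
--
--     return nDays
-- ===== SOURCE B (Python) =====
-- def solution(D: list, X: int) -> int:
--     # Per day, binary-search the maximal day length k such that the spread
--     # max(rest[:k]) - min(rest[:k]) of the whole candidate day is <= X
--     # (the spread of a prefix is monotone in k, so the predicate is monotone),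
--     # then jump over that block.  Returns 0 on empty input.
--     days = 0
--     rest = D
--     while rest:
--         days += 1
--         lo, hi = 1, len(rest)
--         while lo < hi:
--             mid = (lo + hi + 1) // 2
--             if max(rest[:mid]) - min(rest[:mid]) <= X:
--                 lo = mid
--             else:
--                 hi = mid - 1
--         rest = rest[lo:]
--     return days
-- ===== Notes on version B (the rewrite author's own statement) =====
-- stated objective: alternative
-- what changed: B replaces A's single fold carrying running per-day min/max with a jump decomposition: for each day it binary-searches the maximal day length k whose whole-prefix spread max(rest[:k])-min(rest[:k]) is <= X (the spread predicate is monotone in k), then skips that block; no incremental min/max state is carried.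
import Mathlib
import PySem

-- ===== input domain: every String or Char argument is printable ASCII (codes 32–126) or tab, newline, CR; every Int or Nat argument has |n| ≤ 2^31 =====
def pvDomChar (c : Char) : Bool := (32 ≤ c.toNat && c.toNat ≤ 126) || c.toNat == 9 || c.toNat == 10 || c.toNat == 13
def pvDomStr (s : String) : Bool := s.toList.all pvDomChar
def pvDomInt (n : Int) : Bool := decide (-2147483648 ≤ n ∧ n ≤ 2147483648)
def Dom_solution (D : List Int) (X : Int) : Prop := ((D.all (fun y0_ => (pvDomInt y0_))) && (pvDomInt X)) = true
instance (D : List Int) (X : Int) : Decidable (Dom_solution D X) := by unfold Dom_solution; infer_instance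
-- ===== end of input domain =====

-- B replaces the running min/max fold with a per-day binary search for the maximal
-- day length by whole-prefix spread (objective: alternative, similar cost).

-- ===== PORT A =====
-- A: one fold over indices 1..len(D)-1 carrying (nDays, minDifficulty, maxDifficulty).
def solution (D : List Int) (X : Int) : Int :=
  -- D[0]: Pre_solution excludes D = [], where Python raises IndexError
  let minDifficulty : Int := PySem.List.pyGetD D 0 0
  let maxDifficulty : Int := minDifficulty
  ((PySem.List.pyRange 1 (D.length : Int) 1).foldl
    (fun (s : Int × Int × Int) i =>
      let currentDifficulty := PySem.List.pyGetD D i 0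
      if X < currentDifficulty - s.2.1 ∨ X < s.2.2 - currentDifficulty then
        (s.1 + 1, currentDifficulty, currentDifficulty)
      else
        (s.1, min s.2.1 currentDifficulty, max s.2.2 currentDifficulty))
    (1, minDifficulty, maxDifficulty)).1

-- ===== PORT B =====
-- inner while loop of Source B: binary search on day length k in [lo,hi];
-- rest[:mid] is rest.take mid (Python slice with bounds 0 and mid ≥ 0),
-- max(seg)/min(seg) on the nonempty slice via PySem.List.max?/min?;
-- mid = (lo + hi + 1) // 2: lo, hi are Nat (Python ints ≥ 0 here), so Nat
-- division is exactly Python's floor division.  The loop is written with a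
-- fuel argument hi - lo (an upper bound on the iterations), a totality guard
-- only: with enough fuel the branch structure is exactly Source B's while loop.
def altSearchGo (rest : List Int) (X : Int) : Nat → Nat → Nat → Nat
  | 0, lo, _ => lo
  | f + 1, lo, hi =>
    if lo < hi then
      if (PySem.List.max? (rest.take ((lo + hi + 1) / 2)) (fun y => y)).getD 0
          - (PySem.List.min? (rest.take ((lo + hi + 1) / 2)) (fun y => y)).getD 0 ≤ X then
        altSearchGo rest X f ((lo + hi + 1) / 2) hi
      else
        altSearchGo rest X f lo ((lo + hi + 1) / 2 - 1)
    else lo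

def altSearch (rest : List Int) (X : Int) (lo hi : Nat) : Nat :=
  altSearchGo rest X (hi - lo) lo hi

-- outer while loop of Source B: one day per iteration, jump over the found block;
-- fuel = length of the remaining list (each day consumes at least one level).
def altOuterBGo (X : Int) : Nat → List Int → Int
  | 0, _ => 0
  | _ + 1, [] => 0
  | f + 1, d :: xs =>
    1 + altOuterBGo X f ((d :: xs).drop (altSearch (d :: xs) X 1 (d :: xs).length))

def altOuterB (X : Int) (l : List Int) : Int := altOuterBGo X l.length l

def solution_alt (D : List Int) (X : Int) : Int := altOuterB X D

-- ===== PRECONDITION & SPEC =====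
-- Pre_ excludes only the empty list, on which Python A raises IndexError reading D[0].
def Pre_solution (D : List Int) (X : Int) : Prop := D ≠ []
instance (D : List Int) (X : Int) : Decidable (Pre_solution D X) := by unfold Pre_solution; infer_instance
def pvWitness_solution : List Int × Int := ([1, 5, 2], 3)

def Spec_solution (D : List Int) (X : Int) (out : Int) : Prop := out = solution_alt D X
instance (D : List Int) (X : Int) (out : Int) : Decidable (Spec_solution D X out) := by unfold Spec_solution; infer_instance

-- ===== CLAIM (what is proved, stated in full; the proofs are below) =====
def Claim_equal_solution : Prop := ∀ (D : List Int) (X : Int), Dom_solution D X → Pre_solution D X → Spec_solution D X (solution D X)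

-- ===== LEMMAS AND PROOFS =====

-- Proof-side intermediate: A's greedy rewritten as nested loops with running min/max
-- (used only as a bridge between the two ports, defined here below the claim block).
def midInner (X : Int) : Int → Int → List Int → List Int
  | _, _, [] => []
  | lo, hi, c :: xs =>
    if max hi c - min lo c ≤ X then midInner X (min lo c) (max hi c) xs else c :: xs

theorem midInner_length_le (X lo hi : Int) (xs : List Int) :
    (midInner X lo hi xs).length ≤ xs.length := by
  induction xs generalizing lo hi with
  | nil => simp [midInner]
  | cons c t ih =>
    simp only [midInner]
    split
    · exact Nat.le_succ_of_le (ih _ _)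
    · simp

def midOuter (X : Int) : List Int → Int
  | [] => 0
  | d :: xs => 1 + midOuter X (midInner X d d xs)
termination_by xs => xs.length
decreasing_by
  exact Nat.lt_succ_of_le (midInner_length_le X d d xs)

-- the number of elements midInner consumes
def cnt (X : Int) : Int → Int → List Int → Nat
  | _, _, [] => 0
  | lo, hi, c :: xs =>
    if max hi c - min lo c ≤ X then cnt X (min lo c) (max hi c) xs + 1 else 0

theorem midInner_eq_drop (X : Int) (xs : List Int) : ∀ lo hi : Int,
    midInner X lo hi xs = xs.drop (cnt X lo hi xs) := by
  induction xs with
  | nil => intro lo hi; simp [midInner, cnt]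
  | cons c t ih =>
    intro lo hi
    simp only [midInner, cnt]
    split
    · rw [ih]; simp
    · simp

theorem cnt_le_length (X : Int) (xs : List Int) : ∀ lo hi : Int,
    cnt X lo hi xs ≤ xs.length := by
  induction xs with
  | nil => intro lo hi; simp [cnt]
  | cons c t ih =>
    intro lo hi
    simp only [cnt]
    split
    · simpa using Nat.succ_le_succ (ih (min lo c) (max hi c))
    · simp

-- spread of the j-prefix of a day that starts with running bounds lo ≤ hi
theorem cnt_spec (X : Int) (xs : List Int) : ∀ lo hi : Int, lo ≤ hi → hi - lo ≤ X →
    ((xs.take (cnt X lo hi xs)).foldl max hi - (xs.take (cnt X lo hi xs)).foldl min lo ≤ X)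
    ∧ (cnt X lo hi xs < xs.length →
        ¬ ((xs.take (cnt X lo hi xs + 1)).foldl max hi
            - (xs.take (cnt X lo hi xs + 1)).foldl min lo ≤ X)) := by
  induction xs with
  | nil =>
    intro lo hi h1 h2
    exact ⟨by simpa [cnt] using h2, by simp [cnt]⟩
  | cons c t ih =>
    intro lo hi h1 h2
    simp only [cnt]
    by_cases h : max hi c - min lo c ≤ X
    · rw [if_pos h]
      have := ih (min lo c) (max hi c) (by omega) h
      constructor
      · simpa [List.take_succ_cons, List.foldl_cons] using this.1
      · intro hlt
        have h2x := this.2 (by simpa using hlt)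
        simpa [List.take_succ_cons, List.foldl_cons] using h2x
    · rw [if_neg h]
      refine ⟨by simpa using h2, fun _ => ?_⟩
      simpa using h

-- monotonicity of running extrema under list extension
theorem foldl_max_append (a : Int) (l1 l2 : List Int) :
    (l1 ++ l2).foldl max a = l2.foldl max (l1.foldl max a) := List.foldl_append
theorem foldl_min_append (a : Int) (l1 l2 : List Int) :
    (l1 ++ l2).foldl min a = l2.foldl min (l1.foldl min a) := List.foldl_append

-- Q rest X k : the binary-search predicate of Source B on day length k (via take)
def Q (rest : List Int) (X : Int) (k : Nat) : Prop :=
  (PySem.List.max? (rest.take k) (fun y => y)).getD 0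
    - (PySem.List.min? (rest.take k) (fun y => y)).getD 0 ≤ X

theorem Q_cons (d : Int) (xs : List Int) (X : Int) (j : Nat) :
    Q (d :: xs) X (j + 1) ↔ (xs.take j).foldl max d - (xs.take j).foldl min d ≤ X := by
  simp [Q, List.take_succ_cons, PySem.List.max?_id_cons, PySem.List.min?_id_cons]

theorem Q_anti (d : Int) (xs : List Int) (X : Int) :
    ∀ j k : Nat, 1 ≤ j → j ≤ k → Q (d :: xs) X k → Q (d :: xs) X j := by
  intro j' k' hj hjk' hQ
  obtain ⟨j, rfl⟩ : ∃ j, j' = j + 1 := ⟨j' - 1, by omega⟩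
  obtain ⟨k, rfl⟩ : ∃ k, k' = k + 1 := ⟨k' - 1, by omega⟩
  have hjk : j ≤ k := by omega
  rw [Q_cons] at hQ ⊢
  have hsplit : xs.take k = xs.take j ++ (xs.drop j).take (k - j) := by
    have hk : k = j + (k - j) := by omega
    rw [hk, List.take_add]
    simp
  rw [hsplit, foldl_max_append, foldl_min_append] at hQ
  have h1 := (PySem.List.le_foldl_max ((xs.drop j).take (k - j)) ((xs.take j).foldl max d)).1
  have h2 := (PySem.List.foldl_min_le ((xs.drop j).take (k - j)) ((xs.take j).foldl min d)).1
  omega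

-- generic characterisation of the binary search for this monotone predicate
theorem altSearchGo_eq (rest : List Int) (X : Int) :
    ∀ f lo hi m : Nat, hi - lo ≤ f → 1 ≤ lo → lo ≤ m → m ≤ hi →
    (∀ j k : Nat, 1 ≤ j → j ≤ k → Q rest X k → Q rest X j) →
    (Q rest X m ∨ m = lo) → (m < hi → ¬ Q rest X (m + 1)) →
    altSearchGo rest X f lo hi = m := by
  intro f
  induction f with
  | zero =>
    intro lo hi m hfuel h1 hlm hmh _ _ _
    simp only [altSearchGo]
    omega
  | succ f ih =>
    intro lo hi m hfuel h1 hlm hmh anti hQm hbd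
    simp only [altSearchGo]
    split
    · rename_i hlt
      have hmid1 : lo + 1 ≤ (lo + hi + 1) / 2 := by omega
      have hmid2 : (lo + hi + 1) / 2 ≤ hi := by omega
      split
      · rename_i hq
        have hq' : Q rest X ((lo + hi + 1) / 2) := hq
        have hge : (lo + hi + 1) / 2 ≤ m := by
          by_contra hc
          push_neg at hc
          have : Q rest X (m + 1) := anti (m + 1) ((lo + hi + 1) / 2) (by omega) (by omega) hq'
          exact hbd (by omega) this
        refine ih _ hi m (by omega) (by omega) hge hmh anti ?_ hbd
        rcases hQm with h | h
        · exact Or.inl h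
        · omega
      · rename_i hq
        have hq' : ¬ Q rest X ((lo + hi + 1) / 2) := hq
        have hle : m ≤ (lo + hi + 1) / 2 - 1 := by
          by_contra hc
          push_neg at hc
          rcases hQm with h | h
          · exact hq' (anti _ m (by omega) (by omega) h)
          · omega
        refine ih lo _ m (by omega) h1 hlm hle anti hQm ?_
        intro hlt2
        exact hbd (by omega)
    · rename_i hge
      omega

theorem altSearch_eq (rest : List Int) (X : Int) :
    ∀ lo hi m : Nat, 1 ≤ lo → lo ≤ m → m ≤ hi →
    (∀ j k : Nat, 1 ≤ j → j ≤ k → Q rest X k → Q rest X j) →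
    (Q rest X m ∨ m = lo) → (m < hi → ¬ Q rest X (m + 1)) →
    altSearch rest X lo hi = m := by
  intro lo hi m h1 hlm hmh anti hQm hbd
  exact altSearchGo_eq rest X (hi - lo) lo hi m le_rfl h1 hlm hmh anti hQm hbd

-- one day: B's binary search finds exactly 1 + (elements the greedy consumes)
theorem day_eq (d : Int) (xs : List Int) (X : Int) :
    altSearch (d :: xs) X 1 (d :: xs).length = cnt X d d xs + 1 := by
  by_cases hX : 0 ≤ X
  · have hs := cnt_spec X xs d d le_rfl (by omega)
    refine altSearch_eq (d :: xs) X 1 (d :: xs).length (cnt X d d xs + 1) (by omega)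
      (by omega) (by have := cnt_le_length X xs d d; simp; omega)
      (Q_anti d xs X) (Or.inl ?_) ?_
    · rw [Q_cons]; exact hs.1
    · intro hlt
      have hlen : cnt X d d xs < xs.length := by simp at hlt; omega
      have := hs.2 hlen
      rw [Q_cons]
      exact this
  · -- X < 0: every day is a single level; cnt = 0 and no length 2 fits
    have hc : cnt X d d xs = 0 := by
      cases xs with
      | nil => simp [cnt]
      | cons c t => simp only [cnt]; rw [if_neg (by omega)]
    rw [hc]
    refine altSearch_eq (d :: xs) X 1 (d :: xs).length 1 le_rfl le_rfl (by simp)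
      (Q_anti d xs X) (Or.inr rfl) ?_
    intro hlt
    have hxs : xs ≠ [] := by simp at hlt; exact List.ne_nil_of_length_pos (by omega)
    cases xs with
    | nil => simp at hxs
    | cons c t =>
      rw [show (1 : Nat) + 1 = 0 + 1 + 1 from rfl, Q_cons]
      intro habs
      simp [List.take_succ_cons] at habs
      omega

-- the two decompositions of B agree with the greedy nested loops
theorem altOuterBGo_eq_midOuter (X : Int) :
    ∀ (f : Nat) (l : List Int), l.length ≤ f → altOuterBGo X f l = midOuter X l := by
  intro f
  induction f with
  | zero =>
    intro l hl
    have : l = [] := List.eq_nil_of_length_eq_zero (by omega)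
    subst this
    rw [midOuter]
    rfl
  | succ f ih =>
    intro l hl
    cases l with
    | nil => rw [midOuter]; rfl
    | cons d xs =>
      rw [show altOuterBGo X (f + 1) (d :: xs)
            = 1 + altOuterBGo X f ((d :: xs).drop (altSearch (d :: xs) X 1 (d :: xs).length))
          from rfl]
      rw [midOuter, day_eq, midInner_eq_drop]
      congr 1
      have hdrop : (d :: xs).drop (cnt X d d xs + 1) = xs.drop (cnt X d d xs) := by
        simp [List.drop_succ_cons]
      rw [hdrop]
      refine ih _ ?_
      simp only [List.length_drop]
      simp at hl
      omega

theorem altOuterB_eq_midOuter (X : Int) (l : List Int) :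
    altOuterB X l = midOuter X l :=
  altOuterBGo_eq_midOuter X l.length l le_rfl

-- Loop correspondence: starting mid-day with window (lo, hi) satisfying the day
-- invariant, A's remaining fold counts exactly the days the nested loops produce.
theorem key (X : Int) (xs : List Int) : ∀ (n lo hi : Int), lo ≤ hi → (hi - lo ≤ X ∨ lo = hi) →
    (xs.foldl
      (fun (s : Int × Int × Int) (c : Int) =>
        if X < c - s.2.1 ∨ X < s.2.2 - c then (s.1 + 1, c, c)
        else (s.1, min s.2.1 c, max s.2.2 c))
      (n, lo, hi)).1 = n + midOuter X (midInner X lo hi xs) := by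
  induction xs with
  | nil => intro n lo hi _ _; simp [midInner, midOuter]
  | cons c t ih =>
    intro n lo hi hle hinv
    simp only [List.foldl_cons]
    by_cases h : X < c - lo ∨ X < hi - c
    · rw [if_pos h]
      have hcond : ¬ (max hi c - min lo c ≤ X) := by omega
      rw [show midInner X lo hi (c :: t) = c :: t from by simp [midInner, hcond]]
      rw [show midOuter X (c :: t) = 1 + midOuter X (midInner X c c t) from by rw [midOuter]]
      rw [ih (n + 1) c c le_rfl (Or.inr rfl)]
      ring
    · rw [if_neg h]
      rw [show midInner X lo hi (c :: t) = midInner X (min lo c) (max hi c) t from by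
        simp [midInner]; omega]
      exact ih n (min lo c) (max hi c) (by omega) (by omega)

-- ===== VERDICT (by name: the statement is the Claim_ definition above) =====
theorem solution_spec : Claim_equal_solution := by
  intro D X _ hpre
  unfold Spec_solution solution solution_alt
  match D, hpre with
  | d :: t, _ =>
    simp only
    rw [PySem.List.foldl_pyRange_pyGetD' (d :: t) 0
      (fun (s : Int × Int × Int) (c : Int) =>
        if X < c - s.2.1 ∨ X < s.2.2 - c then (s.1 + 1, c, c)
        else (s.1, min s.2.1 c, max s.2.2 c)) _ (by norm_num)]
    norm_num [PySem.List.pyGetD, PySem.List.pyGet?, PySem.List.pyIdx?]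
    rw [key X t 1 d d le_rfl (Or.inr rfl)]
    rw [altOuterB_eq_midOuter, midOuter]
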